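-- pv_equiv track=rewrite | github.com/liuyijiang1994/sequence_labeling | corpus_maker/maker.py | stc_idx_by_words
-- ===== SOURCE A (Python) =====
-- def stc_idx_by_words(words, sentence_list):
--     '''
--     找到list中的词语都在的那个句子的idx的list
--     '''
--     stc_idx_list = []
--     for idx, stc in enumerate(sentence_list):
--         words_in_flag = True
--         for word in words:
--             if stc.find(word) < 0:
--                 words_in_flag = False
--                 break
--         if words_in_flag:
--             stc_idx_list.append(idx)
--     return stc_idx_list
-- ===== SOURCE B (Python) =====
-- def stc_idx_by_words(words, sentence_list):
--     '''
--     找到list中的词语都在的那个句子的idx的list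
--     '''
--     if not words:
--         return list(range(len(sentence_list)))
--     common = None
--     for word in words:
--         idxs = {i for i, s in enumerate(sentence_list) if word in s}
--         common = idxs if common is None else common & idxs
--     return sorted(common)
-- ===== Notes on version B (the rewrite author's own statement) =====
-- stated objective: alternative
-- what changed: Sentence-major scan with an early-break flag replaced by the word-major set-intersection idiom: one index set per word, intersected across words, then sorted.
import Mathlib
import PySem

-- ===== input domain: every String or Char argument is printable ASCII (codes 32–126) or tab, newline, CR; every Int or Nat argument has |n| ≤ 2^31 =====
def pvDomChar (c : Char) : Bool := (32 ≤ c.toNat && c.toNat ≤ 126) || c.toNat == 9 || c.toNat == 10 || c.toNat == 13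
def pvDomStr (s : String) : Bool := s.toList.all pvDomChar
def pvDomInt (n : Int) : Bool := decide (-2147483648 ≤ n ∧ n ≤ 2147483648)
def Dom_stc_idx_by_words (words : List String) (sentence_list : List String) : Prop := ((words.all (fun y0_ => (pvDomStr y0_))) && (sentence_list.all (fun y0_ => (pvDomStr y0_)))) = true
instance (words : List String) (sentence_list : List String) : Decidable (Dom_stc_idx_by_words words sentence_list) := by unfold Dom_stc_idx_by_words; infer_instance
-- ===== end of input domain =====

-- B replaces A's sentence-major scan (early-break flag per sentence) by the word-major
-- set-intersection idiom (one index set per word, running intersection, sorted at the end);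
-- objective: alternative decomposition, same exact result.

-- ===== PORT A =====
-- the inner 'for word in words: if stc.find(word) < 0: flag=False; break' loop
def stcCheckWords (words : List String) (stc : String) : Bool :=
  match words with
  | [] => true
  | word :: rest => if PySem.Str.find stc word < 0 then false else stcCheckWords rest stc

def stc_idx_by_words (words : List String) (sentence_list : List String) : List Int :=
  (PySem.List.enumerate sentence_list 0).foldl
    (fun acc p => if stcCheckWords words p.2 then acc ++ [p.1] else acc) []

-- ===== PORT B =====
-- {i for i, s in enumerate(sentence_list) if word in s}: enumerate indices are distinct,
-- so the set's elements in first-insertion order are exactly this filtered index list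
def wordIdxSet (sentence_list : List String) (word : String) : PySem.Set Int :=
  (PySem.List.enumerate sentence_list 0).foldl
    (fun acc p => if PySem.Str.isIn word p.2 then acc ++ [p.1] else acc) []

def stc_idx_by_words_alt (words : List String) (sentence_list : List String) : List Int :=
  match words with
  | [] => PySem.List.pyRange 0 (PySem.List.len sentence_list) 1
  | w :: rest =>
      PySem.List.sorted
        (rest.foldl (fun common word => PySem.Set.inter common (wordIdxSet sentence_list word))
          (wordIdxSet sentence_list w))
        (fun x => x)

-- ===== PRECONDITION & SPEC =====
def Spec_stc_idx_by_words (words : List String) (sentence_list : List String) (out : List Int) : Prop := out = stc_idx_by_words_alt words sentence_list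
instance (words : List String) (sentence_list : List String) (out : List Int) : Decidable (Spec_stc_idx_by_words words sentence_list out) := by unfold Spec_stc_idx_by_words; infer_instance

-- ===== CLAIM (what is proved, stated in full; the proofs are below) =====
def Claim_equal_stc_idx_by_words : Prop := ∀ (words : List String) (sentence_list : List String), Dom_stc_idx_by_words words sentence_list → Spec_stc_idx_by_words words sentence_list (stc_idx_by_words words sentence_list)

-- ===== LEMMAS AND PROOFS =====

-- the filtered index list both programs compute, parameterised by the per-sentence predicate
def idxF (sentence_list : List String) (p : String → Bool) : List Int :=
  ((PySem.List.enumerate sentence_list 0).filter (fun q => p q.2)).map (fun q => q.1)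

theorem stcCheckWords_eq (words : List String) (s : String) :
    stcCheckWords words s = words.all (fun w => PySem.Str.isIn w s) := by
  induction words with
  | nil => rfl
  | cons w rest ih =>
      rw [stcCheckWords, List.all_cons]
      by_cases h : PySem.Str.find s w < 0
      · have hin : PySem.Str.isIn w s = false := by
          rw [← Bool.not_eq_true]
          intro hc
          have := (PySem.Str.find_nonneg_iff s w).mpr ((PySem.Str.isIn_iff_infix w s).mp hc)
          omega
        rw [if_pos h, hin, Bool.false_and]
      · have hin : PySem.Str.isIn w s = true := by
          by_contra hn
          have hni : ¬ w.toList <:+: s.toList := fun hc => hn ((PySem.Str.isIn_iff_infix w s).mpr hc)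
          have := (PySem.Str.find_eq_neg_one_iff s w).mpr hni
          omega
        rw [if_neg h, ih, hin, Bool.true_and]

theorem A_eq_idxF (words : List String) (sl : List String) :
    stc_idx_by_words words sl = idxF sl (fun s => words.all (fun w => PySem.Str.isIn w s)) := by
  unfold stc_idx_by_words idxF
  have := PySem.List.foldl_append_if (fun q : Int × String => stcCheckWords words q.2)
    (fun q : Int × String => q.1) (PySem.List.enumerate sl 0) []
  simp only [List.nil_append] at this
  rw [this]
  congr 1
  apply List.filter_congr
  intro e _
  rw [stcCheckWords_eq]

theorem wordIdxSet_eq_idxF (sl : List String) (w : String) :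
    wordIdxSet sl w = idxF sl (fun s => PySem.Str.isIn w s) := by
  unfold wordIdxSet idxF
  have := PySem.List.foldl_append_if (fun q : Int × String => PySem.Str.isIn w q.2)
    (fun q : Int × String => q.1) (PySem.List.enumerate sl 0) []
  simp only [List.nil_append] at this
  rw [this]

theorem mem_idxF_iff (sl : List String) (p : String → Bool) (q : Int × String)
    (hq : q ∈ PySem.List.enumerate sl 0) : q.1 ∈ idxF sl p ↔ p q.2 = true := by
  unfold idxF
  constructor
  · intro h
    rcases List.mem_map.mp h with ⟨e, he, hfst⟩
    rcases List.mem_filter.mp he with ⟨heE, hpe⟩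
    rcases (PySem.List.mem_enumerate_iff sl 0 e).mp heE with ⟨k, hk, rfl⟩
    rcases (PySem.List.mem_enumerate_iff sl 0 q).mp hq with ⟨k', hk', rfl⟩
    have : k = k' := by simpa using hfst
    subst this
    simpa using hpe
  · intro h
    exact List.mem_map.mpr ⟨q, List.mem_filter.mpr ⟨hq, h⟩, rfl⟩

theorem inter_idxF (sl : List String) (p q : String → Bool) :
    PySem.Set.inter (idxF sl p) (idxF sl q) = idxF sl (fun s => p s && q s) := by
  have h : PySem.Set.inter (idxF sl p) (idxF sl q)
      = List.filter (fun x => PySem.Set.contains (idxF sl q) x)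
          (((PySem.List.enumerate sl 0).filter (fun e => p e.2)).map (fun e => e.1)) := rfl
  rw [h, List.filter_map, List.filter_filter]
  unfold idxF
  congr 1
  apply List.filter_congr
  intro e he
  have hiff := mem_idxF_iff sl p e he
  have hiffq := mem_idxF_iff sl q e he
  have hc : PySem.Set.contains (idxF sl q) e.1 = q e.2 := by
    by_cases hq : q e.2 = true
    · simp [PySem.Set.contains, hiffq.mpr hq, hq]
    · have hnm : ¬ e.1 ∈ idxF sl q := fun hm => hq (hiffq.mp hm)
      simp [PySem.Set.contains, hnm, hq]
  show (PySem.Set.contains (idxF sl q) e.1 && p e.2) = (p e.2 && q e.2)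
  rw [hc, Bool.and_comm]

theorem foldl_inter_idxF (sl : List String) (rest : List String) (g : String → Bool) :
    rest.foldl (fun c w => PySem.Set.inter c (wordIdxSet sl w)) (idxF sl g)
      = idxF sl (fun s => g s && rest.all (fun w => PySem.Str.isIn w s)) := by
  induction rest generalizing g with
  | nil => simp
  | cons w rest ih =>
      rw [List.foldl_cons, wordIdxSet_eq_idxF sl w, inter_idxF, ih]
      congr 1
      funext s
      rw [List.all_cons, Bool.and_assoc]

theorem idxF_pairwise_lt (sl : List String) (p : String → Bool) :
    (idxF sl p).Pairwise (· < ·) := by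
  have hsub : (idxF sl p).Sublist ((PySem.List.enumerate sl 0).map (fun q => q.1)) :=
    List.Sublist.map _ List.filter_sublist
  have hpw : ((PySem.List.enumerate sl 0).map (fun q => q.1)).Pairwise (· < ·) := by
    rw [PySem.List.map_fst_enumerate]
    exact PySem.List.pairwise_lt_pyRange_one 0 _
  exact hpw.sublist hsub

theorem sorted_idxF (sl : List String) (p : String → Bool) :
    PySem.List.sorted (idxF sl p) (fun x => x) = idxF sl p :=
  PySem.List.sorted_eq_of_perm_of_pairwise_lt _ _ _ (List.Perm.refl _) (idxF_pairwise_lt sl p)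

-- ===== VERDICT (by name: the statement is the Claim_ definition above) =====
theorem stc_idx_by_words_spec : Claim_equal_stc_idx_by_words := by
  intro words sl _
  show stc_idx_by_words words sl = stc_idx_by_words_alt words sl
  rw [A_eq_idxF]
  cases words with
  | nil =>
      show idxF sl _ = PySem.List.pyRange 0 (PySem.List.len sl) 1
      unfold idxF
      simp [PySem.List.map_fst_enumerate]
  | cons w rest =>
      show _ = PySem.List.sorted _ _
      rw [wordIdxSet_eq_idxF, foldl_inter_idxF, sorted_idxF]
      simp only [List.all_cons]
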